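-- pv_equiv track=rewrite | github.com/njnelso/python | main (1).py | less_than_ten
-- ===== SOURCE A (Python) =====
-- def less_than_ten(str3):
--
--   #local variables
--   counter = 0
--
--   #for loop counting characters
--   for char in str3:
--     counter += 1
--
--   #if counter is greater than 10
--   if counter < 10:
--     return True
--   else:
--     return False
-- ===== SOURCE B (Python) =====
-- def less_than_ten(str3):
--   return len(str3) < 10
-- ===== Notes on version B (the rewrite author's own statement) =====
-- stated objective: idiomatic
-- what changed: Replaces the char-by-char counting loop and if/else with a single len() call compared to 10, returning the comparison directly.
import Mathlib
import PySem

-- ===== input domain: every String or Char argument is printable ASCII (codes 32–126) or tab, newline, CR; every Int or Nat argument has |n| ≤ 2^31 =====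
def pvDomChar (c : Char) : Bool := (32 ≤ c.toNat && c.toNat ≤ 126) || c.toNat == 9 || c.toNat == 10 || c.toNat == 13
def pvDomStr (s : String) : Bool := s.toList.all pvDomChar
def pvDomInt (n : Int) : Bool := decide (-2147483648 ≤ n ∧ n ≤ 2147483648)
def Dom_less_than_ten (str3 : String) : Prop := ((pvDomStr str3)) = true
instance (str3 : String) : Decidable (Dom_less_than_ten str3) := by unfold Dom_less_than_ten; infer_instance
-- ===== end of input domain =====

-- B replaces A's char-by-char counting loop with a single length query compared to 10 (idiomatic).

-- ===== PORT A =====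
-- A: counter = 0; for char in str3: counter += 1; return counter < 10
def less_than_ten (str3 : String) : Bool :=
  let counter : Int := str3.toList.foldl (fun counter _ => counter + 1) 0
  if counter < 10 then true else false

-- ===== PORT B =====
-- B: return len(str3) < 10
def less_than_ten_alt (str3 : String) : Bool :=
  decide ((PySem.Str.len str3) < 10)

-- ===== PRECONDITION & SPEC =====
def Spec_less_than_ten (str3 : String) (out : Bool) : Prop := out = less_than_ten_alt str3
instance (str3 : String) (out : Bool) : Decidable (Spec_less_than_ten str3 out) := by unfold Spec_less_than_ten; infer_instance

-- ===== CLAIM (what is proved, stated in full; the proofs are below) =====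
def Claim_equal_less_than_ten : Prop := ∀ (str3 : String), Dom_less_than_ten str3 → Spec_less_than_ten str3 (less_than_ten str3)

-- ===== LEMMAS AND PROOFS =====
lemma foldl_count_add (l : List Char) (n : Int) :
    l.foldl (fun counter (_ : Char) => counter + 1) n = n + l.length := by
  induction l generalizing n with
  | nil => simp
  | cons c t ih => simp [List.foldl, ih]; omega

-- ===== VERDICT (by name: the statement is the Claim_ definition above) =====
theorem less_than_ten_spec : Claim_equal_less_than_ten := by
  intro str3 _
  unfold Spec_less_than_ten less_than_ten less_than_ten_alt PySem.Str.len
  simp [foldl_count_add]
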